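-- pv_equiv track=rewrite | github.com/chihhaolin/Python | Principles_of_Computing/2048/python_file/main.py | add_to_left
-- ===== SOURCE A (Python) =====
-- def add_to_left(line):
--     """
--     step 2: add together
--     """
--     res = [0 for dummy in range(len(line))]
--     index = 0
--     index_res = 0
--     while(index < (len(line)-1)):
--         if line[index] == line[index+1]:
--             res[index_res] = line[index]*2
--             index += 2
--         else:
--             res[index_res] = line[index]
--             index += 1
--         index_res += 1
--
--     if index < len(line):
--         res[index_res] = line[-1]
--
--     return res
-- ===== SOURCE B (Python) =====
-- def add_to_left(line):
--     # Run-length encode the line, then turn each run of k equal values v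
--     # into k//2 merged tiles 2*v plus one leftover v if k is odd; pad with zeros.
--     runs = []
--     for v in line:
--         if runs and runs[-1][0] == v:
--             runs[-1] = (v, runs[-1][1] + 1)
--         else:
--             runs.append((v, 1))
--     out = []
--     for v, k in runs:
--         out.extend([2 * v] * (k // 2))
--         if k % 2:
--             out.append(v)
--     out.extend([0] * (len(line) - len(out)))
--     return out
-- ===== Notes on version B (the rewrite author's own statement) =====
-- stated objective: alternative
-- what changed: Replaces A's single greedy pass with two parallel indices into a pre-allocated zero array by a two-stage algorithm: run-length encode the line, then emit each run of k equal tiles v as k//2 merged tiles 2*v plus an odd leftover v, padding with zeros at the end.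
import Mathlib
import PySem

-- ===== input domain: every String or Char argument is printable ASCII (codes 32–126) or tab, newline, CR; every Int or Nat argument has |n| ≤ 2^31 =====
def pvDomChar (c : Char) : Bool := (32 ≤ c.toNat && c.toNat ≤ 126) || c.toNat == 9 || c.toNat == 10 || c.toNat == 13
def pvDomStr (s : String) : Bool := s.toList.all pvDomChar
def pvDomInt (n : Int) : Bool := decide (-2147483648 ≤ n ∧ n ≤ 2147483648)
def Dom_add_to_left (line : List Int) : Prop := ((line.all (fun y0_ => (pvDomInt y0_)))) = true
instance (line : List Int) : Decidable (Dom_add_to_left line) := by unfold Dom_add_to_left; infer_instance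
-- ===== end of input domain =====

-- B replaces A's single greedy pass with two parallel indices over a pre-allocated array by a
-- two-stage algorithm: run-length encode the line, then emit k//2 doubled tiles (+ odd leftover)
-- per run and pad with zeros (objective: alternative).

-- ===== PORT A =====
-- A's while loop: res is the pre-allocated array (updated with List.set, always in range in
-- Python), index/index_res are the two cursors.  Python's 'index < len(line)-1' over ints
-- coincides with the Nat comparison here: for index = 0 on an empty line both are false.
-- fuel = line.length bounds the iteration count (index grows by ≥ 1 per step); it only
-- makes the recursion structural and never cuts the loop short.
def aLoop (fuel : Nat) (line res : List Int) (index index_res : Nat) : List Int × Nat × Nat :=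
  match fuel with
  | 0 => (res, index, index_res)
  | fuel + 1 =>
    if index < line.length - 1 then
      if line.getD index 0 = line.getD (index + 1) 0 then
        aLoop fuel line (res.set index_res (line.getD index 0 * 2)) (index + 2) (index_res + 1)
      else
        aLoop fuel line (res.set index_res (line.getD index 0)) (index + 1) (index_res + 1)
    else
      (res, index, index_res)

def add_to_left (line : List Int) : List Int :=
  let res0 := List.replicate line.length 0
  let t := aLoop line.length line res0 0 0
  if t.2.1 < line.length then
    t.1.set t.2.2 ((PySem.List.pyGet? line (-1)).getD 0)   -- res[index_res] = line[-1]
  else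
    t.1

-- ===== PORT B =====
-- Source B loop 1: runs.append / runs[-1] = (v, k+1); the 'runs and runs[-1][0] == v' test is the
-- getLast? match, and replacing runs[-1] is dropLast ++ [new last].
def rleStep (runs : List (Int × Nat)) (v : Int) : List (Int × Nat) :=
  match runs.getLast? with
  | some (u, k) => if u = v then runs.dropLast ++ [(v, k + 1)] else runs ++ [(v, 1)]
  | none => runs ++ [(v, 1)]

-- Source B loop 2 body: out.extend([2*v]*(k//2)); if k % 2: out.append(v)
def emitRun (out : List Int) (v : Int) (k : Nat) : List Int :=
  (out ++ List.replicate (k / 2) (2 * v)) ++ (if k % 2 = 1 then [v] else [])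

def add_to_left_alt (line : List Int) : List Int :=
  let runs := line.foldl rleStep []
  let out := runs.foldl (fun o (p : Int × Nat) => emitRun o p.1 p.2) []
  out ++ List.replicate (line.length - out.length) 0

-- ===== PRECONDITION & SPEC =====
def Spec_add_to_left (line : List Int) (out : List Int) : Prop := out = add_to_left_alt line
instance (line : List Int) (out : List Int) : Decidable (Spec_add_to_left line out) := by unfold Spec_add_to_left; infer_instance

-- ===== CLAIM (what is proved, stated in full; the proofs are below) =====
def Claim_equal_add_to_left : Prop := ∀ (line : List Int), Dom_add_to_left line → Spec_add_to_left line (add_to_left line)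

-- ===== LEMMAS AND PROOFS =====

-- the canonical greedy merge; both ports are proved equal to it (plus zero padding)
def bMerge : List Int → List Int
  | a :: b :: rest => if a = b then 2 * a :: bMerge rest else a :: bMerge (b :: rest)
  | [a] => [a]
  | [] => []

-- ---- A-side: the loop computes bMerge ----

-- the post-loop fix-up of A, split out for the inductive lemma
def aFinish (line : List Int) (t : List Int × Nat × Nat) : List Int :=
  if t.2.1 < line.length then t.1.set t.2.2 ((PySem.List.pyGet? line (-1)).getD 0) else t.1

lemma set_acc_append (acc : List Int) (k : Nat) (v : Int) (hk : 1 ≤ k) :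
    (acc ++ List.replicate k (0 : Int)).set acc.length v
      = (acc ++ [v]) ++ List.replicate (k - 1) 0 := by
  obtain ⟨k', rfl⟩ : ∃ k', k = k' + 1 := ⟨k - 1, by omega⟩
  rw [List.set_append_right acc.length v (le_refl _)]
  simp [List.replicate_succ]

lemma finish_eq (line : List Int) (index : Nat) (acc : List Int)
    (h1 : index ≤ line.length) (h2 : acc.length ≤ index) (h : ¬ index < line.length - 1) :
    aFinish line (acc ++ List.replicate (line.length - acc.length) 0, index, acc.length)
      = acc ++ bMerge (line.drop index)
          ++ List.replicate (line.length - acc.length - (bMerge (line.drop index)).length) 0 := by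
  by_cases hfix : index < line.length
  · -- index = line.length - 1: exactly one element remains
    have hidx : index = line.length - 1 := by omega
    have hne : line ≠ [] := by intro hh; subst hh; simp at hfix
    obtain ⟨a, hd⟩ : ∃ a, line.drop index = [a] := by
      refine ⟨line.getLast hne, ?_⟩
      rw [hidx]
      exact List.drop_length_sub_one hne
    have hlast : PySem.List.pyGet? line (-1) = some a := by
      have hls := List.drop_length_sub_one hne
      rw [← hidx, hd] at hls
      injection hls with h'
      rw [PySem.List.pyGet?_neg_one, List.getLast?_eq_some_getLast (h := hne), h']
    unfold aFinish
    simp only [hfix, if_pos, hlast, Option.getD_some]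
    rw [set_acc_append acc (line.length - acc.length) a (by omega)]
    rw [hd]
    simp [bMerge, List.append_assoc]
  · -- index = line.length: nothing remains
    have hdrop : line.drop index = [] := by
      apply List.drop_eq_nil_of_le; omega
    unfold aFinish
    simp only [hfix, if_false]
    rw [hdrop]
    simp [bMerge]

lemma loop_eq (line : List Int) : ∀ (fuel index : Nat) (acc : List Int),
    index ≤ line.length → acc.length ≤ index → line.length - 1 ≤ index + fuel →
    aFinish line (aLoop fuel line (acc ++ List.replicate (line.length - acc.length) 0) index acc.length)
      = acc ++ bMerge (line.drop index)
          ++ List.replicate (line.length - acc.length - (bMerge (line.drop index)).length) 0 := by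
  intro fuel
  induction fuel with
  | zero =>
    intro index acc h1 h2 hf
    exact finish_eq line index acc h1 h2 (by omega)
  | succ fuel ih =>
    intro index acc h1 h2 hf
    by_cases h : index < line.length - 1
    · -- line.drop index has at least two elements
      have hlen : 2 ≤ (line.drop index).length := by simp; omega
      obtain ⟨a, b, rest, hd⟩ : ∃ a b rest, line.drop index = a :: b :: rest := by
        match hdd : line.drop index with
        | [] => rw [hdd] at hlen; simp at hlen
        | [x] => rw [hdd] at hlen; simp at hlen
        | x :: y :: r => exact ⟨x, y, r, rfl⟩
      have ha : line.getD index 0 = a := by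
        have h0 : (List.drop index line)[0]? = some a := by rw [hd]; rfl
        rw [List.getElem?_drop] at h0
        simp only [Nat.add_zero] at h0
        simp [List.getD, h0]
      have hb : line.getD (index + 1) 0 = b := by
        have h0 : (List.drop index line)[1]? = some b := by rw [hd]; rfl
        rw [List.getElem?_drop] at h0
        simp [List.getD, h0]
      have hd1 : line.drop (index + 1) = b :: rest := by
        rw [← List.drop_drop, hd]; rfl
      have hd2 : line.drop (index + 2) = rest := by
        rw [← List.drop_drop, hd]; rfl
      rw [aLoop]
      simp only [if_pos h, ha, hb]
      by_cases hab : a = b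
      · rw [if_pos hab]
        rw [set_acc_append acc (line.length - acc.length) (a * 2) (by omega)]
        have hlena : (acc ++ [a * 2]).length = acc.length + 1 := by simp
        have hrec := ih (index + 2) (acc ++ [a * 2]) (by omega) (by rw [hlena]; omega) (by omega)
        rw [hlena] at hrec
        rw [show line.length - acc.length - 1 = line.length - (acc.length + 1) from by omega]
        rw [hrec, hd2, hd]
        simp only [bMerge, if_pos hab, List.length_cons]
        rw [show line.length - (acc.length + 1) - (bMerge rest).length
              = line.length - acc.length - ((bMerge rest).length + 1) from by omega]
        simp [List.append_assoc, mul_comm]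
      · rw [if_neg hab]
        rw [set_acc_append acc (line.length - acc.length) a (by omega)]
        have hlena : (acc ++ [a]).length = acc.length + 1 := by simp
        have hrec := ih (index + 1) (acc ++ [a]) (by omega) (by rw [hlena]; omega) (by omega)
        rw [hlena] at hrec
        rw [show line.length - acc.length - 1 = line.length - (acc.length + 1) from by omega]
        rw [hrec, hd1, hd]
        simp only [bMerge, if_neg hab, List.length_cons]
        rw [show line.length - (acc.length + 1) - (bMerge (b :: rest)).length
              = line.length - acc.length - ((bMerge (b :: rest)).length + 1) from by omega]
        simp [List.append_assoc]
    · rw [aLoop]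
      simp only [if_neg h]
      exact finish_eq line index acc h1 h2 h

-- ---- B-side: RLE + per-run emission computes bMerge ----

-- emit without its accumulator
def emit : List (Int × Nat) → List Int
  | [] => []
  | (v, k) :: rs => (List.replicate (k / 2) (2 * v) ++ (if k % 2 = 1 then [v] else [])) ++ emit rs

lemma emit_foldl (rs : List (Int × Nat)) : ∀ acc : List Int,
    rs.foldl (fun o (p : Int × Nat) => emitRun o p.1 p.2) acc = acc ++ emit rs := by
  induction rs with
  | nil => intro acc; simp [emit]
  | cons p rs ih =>
    intro acc
    obtain ⟨v, k⟩ := p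
    rw [List.foldl_cons, ih]
    simp [emitRun, emit, List.append_assoc]

-- only the last run is ever touched: a strict prefix of the run list is frozen
lemma foldl_rleStep_frozen : ∀ (xs : List Int) (rs : List (Int × Nat)) (a : Int) (k : Nat),
    List.foldl rleStep (rs ++ [(a, k)]) xs = rs ++ List.foldl rleStep [(a, k)] xs := by
  intro xs
  induction xs with
  | nil => intro rs a k; rfl
  | cons x xs ih =>
    intro rs a k
    by_cases hax : a = x
    · rw [List.foldl_cons, List.foldl_cons,
        show rleStep (rs ++ [(a, k)]) x = rs ++ [(x, k + 1)] by
          simp [rleStep, hax],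
        show rleStep [(a, k)] x = [(x, k + 1)] by simp [rleStep, hax],
        ih]
    · rw [List.foldl_cons, List.foldl_cons,
        show rleStep (rs ++ [(a, k)]) x = (rs ++ [(a, k)]) ++ [(x, 1)] by
          simp [rleStep, hax],
        show rleStep [(a, k)] x = [(a, k)] ++ [(x, 1)] by simp [rleStep, hax],
        ih, ih [(a, k)] x 1]
      simp

-- a whole run of k equal tiles merges to k/2 doubled tiles plus an odd leftover
lemma bMerge_replicate : ∀ (k : Nat) (a : Int),
    bMerge (List.replicate k a)
      = List.replicate (k / 2) (2 * a) ++ (if k % 2 = 1 then [a] else [])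
  | 0, a => by simp [bMerge]
  | 1, a => by simp [bMerge]
  | (k + 2), a => by
    have ih := bMerge_replicate k a
    have h2 : (k + 2) / 2 = k / 2 + 1 := by omega
    have h3 : (k + 2) % 2 = k % 2 := by omega
    simp only [List.replicate_succ, bMerge, ih, h2, h3]
    simp

-- ... and the same when more input, starting with a different tile, follows the run
lemma bMerge_replicate_append : ∀ (k : Nat) (a x : Int) (xs : List Int), a ≠ x →
    bMerge (List.replicate k a ++ x :: xs)
      = (List.replicate (k / 2) (2 * a) ++ (if k % 2 = 1 then [a] else [])) ++ bMerge (x :: xs)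
  | 0, a, x, xs, hax => by simp
  | 1, a, x, xs, hax => by
    match xs with
    | [] => simp [bMerge, hax]
    | y :: ys => simp [bMerge, hax]
  | (k + 2), a, x, xs, hax => by
    have ih := bMerge_replicate_append k a x xs hax
    have h2 : (k + 2) / 2 = k / 2 + 1 := by omega
    have h3 : (k + 2) % 2 = k % 2 := by omega
    simp only [List.replicate_succ, List.cons_append, bMerge, ih, h2, h3]
    simp

-- the open last run (a, k) stands for k pending copies of a in front of the rest of the input
lemma rle_run_eq : ∀ (xs : List Int) (a : Int) (k : Nat),
    emit (List.foldl rleStep [(a, k)] xs) = bMerge (List.replicate k a ++ xs) := by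
  intro xs
  induction xs with
  | nil =>
    intro a k
    simp [emit, bMerge_replicate]
  | cons x xs ih =>
    intro a k
    by_cases hax : a = x
    · rw [List.foldl_cons, show rleStep [(a, k)] x = [(x, k + 1)] by simp [rleStep, hax], ih]
      subst hax
      rw [show List.replicate k a ++ a :: xs = List.replicate (k + 1) a ++ xs by
        simp [List.replicate_succ']]
    · rw [List.foldl_cons, show rleStep [(a, k)] x = [(a, k)] ++ [(x, 1)] by simp [rleStep, hax],
        foldl_rleStep_frozen, List.singleton_append, show ∀ l, emit ((a, k) :: l)
          = (List.replicate (k / 2) (2 * a) ++ (if k % 2 = 1 then [a] else [])) ++ emit l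
          from fun l => rfl,
        ih x 1, bMerge_replicate_append k a x xs hax]
      simp [List.cons_append]

lemma rle_emit_eq (line : List Int) : emit (List.foldl rleStep [] line) = bMerge line := by
  match line with
  | [] => rfl
  | x :: xs =>
    rw [List.foldl_cons, show rleStep [] x = [(x, 1)] from rfl, rle_run_eq]
    rfl

-- ===== VERDICT (by name: the statement is the Claim_ definition above) =====
theorem add_to_left_spec : Claim_equal_add_to_left := by
  intro line _
  unfold Spec_add_to_left
  have h := loop_eq line line.length 0 [] (by omega) (by simp) (by omega)
  simp only [List.length_nil, Nat.sub_zero, List.nil_append, List.drop_zero] at h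
  simp only [add_to_left, add_to_left_alt, emit_foldl, rle_emit_eq, List.nil_append]
  simpa [aFinish] using h
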